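-- pv_equiv track=rewrite | github.com/yabincui/topcoder | IntegerGenerator.py | nextInteger
-- ===== SOURCE A (Python) =====
-- def nextInteger(allowed, current):
-- 	allowedDict = [False for x in range(10)]
-- 	for x in allowed:
-- 		allowedDict[x] = True
-- 	for x in current:
-- 		if not allowedDict[int(x)]:
-- 			return 'INVALID INPUT'
-- 	if int(current) == 0 or current[0] == '0':
-- 		return 'INVALID INPUT'
-- 	maxBit = 0
-- 	for x in range(9, 0, -1):
-- 		if allowedDict[x]:
-- 			maxBit = x
-- 			break
-- 	minNonZeroBit = 9
-- 	for x in range(1, 9):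
-- 		if allowedDict[x]:
-- 			minNonZeroBit = x
-- 			break
-- 	minBit = 0 if allowedDict[0] else minNonZeroBit
-- 	if current == (str(maxBit) * len(current)):
-- 		# Increase one bit.
-- 		return str(minNonZeroBit) + (str(minBit) * len(current))
-- 	# Move one bit higher.
-- 	result = list(current)
-- 	for i in range(len(result) - 1, -1, -1):
-- 		x = int(result[i])
-- 		if x < maxBit:
-- 			for j in range(x + 1, 10):
-- 				if allowedDict[j]:
-- 					nextX = j
-- 					break
-- 			result[i] = str(nextX)
-- 			for j in range(i+1, len(result)):
-- 				result[j] = str(minBit)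
-- 			return ''.join(result)
-- ===== SOURCE B (Python) =====
-- def nextInteger(allowed, current):
--     digits = sorted(set(allowed))
--     dset = set(digits)
--     if any(int(c) not in dset for c in current):
--         return 'INVALID INPUT'
--     if current[0] == '0':
--         return 'INVALID INPUT'
--     nz = [d for d in digits if d != 0]
--     m = len(digits)
--     p = len(nz)
--     L = len(current)
--     # encode current as its 0-based ordinal among valid numbers of length L
--     r = nz.index(int(current[0]))
--     for c in current[1:]:
--         r = r * m + digits.index(int(c))
--     r += 1
--     # decode the successor ordinal back to a digit string
--     if r >= p * m ** (L - 1):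
--         # exhausted this length bucket: first ordinal of length L + 1
--         L += 1
--         r = 0
--     rest = []
--     for _ in range(L - 1):
--         r, k = divmod(r, m)
--         rest.append(digits[k])
--     return str(nz[r]) + ''.join(str(d) for d in reversed(rest))
-- ===== Notes on version B (the rewrite author's own statement) =====
-- stated objective: alternative
-- what changed: B replaces A's boolean digit table and rightmost-position scan-and-fill by ordinal arithmetic: it ranks current in the mixed-radix enumeration of valid numbers (first digit ranked among sorted nonzero allowed digits, the rest among all sorted allowed digits), adds one, and unranks the successor ordinal back into digits with divmod, moving to the next length bucket on overflow.
-- outside the precondition, e.g. on nextInteger([-1], '9'): A returns '99', B returns 'INVALID INPUT'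
import Mathlib
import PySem

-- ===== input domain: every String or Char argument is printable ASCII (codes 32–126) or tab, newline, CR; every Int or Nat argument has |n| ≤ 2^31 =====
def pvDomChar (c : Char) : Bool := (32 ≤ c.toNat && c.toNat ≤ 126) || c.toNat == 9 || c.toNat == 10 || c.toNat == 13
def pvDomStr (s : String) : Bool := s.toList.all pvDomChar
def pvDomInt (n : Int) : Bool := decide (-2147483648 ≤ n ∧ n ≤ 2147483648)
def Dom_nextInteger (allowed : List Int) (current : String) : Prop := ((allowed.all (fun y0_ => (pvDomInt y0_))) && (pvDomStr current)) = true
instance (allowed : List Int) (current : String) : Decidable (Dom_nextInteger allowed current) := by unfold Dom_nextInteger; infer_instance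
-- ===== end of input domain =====

-- B replaces A's digit-table scan-and-fill successor by ordinal arithmetic: rank current in the
-- mixed-radix enumeration of valid numbers, add one, unrank (objective: alternative).


-- ===== PORT A =====
-- int(c) on a single char as A applies it; exact on the ASCII digit chars Pre_ admits
def pvDigitVal (c : Char) : Int := (c.toNat : Int) - 48

-- allowedDict[x] = True with Python's negative-index wrap; exact for the -10 ≤ x ≤ 9 Pre_ admits
-- (|x| ≥ 10 raises IndexError in Python)
def pvSetTrue (l : List Bool) (x : Int) : List Bool :=
  l.set (if 0 ≤ x then x.toNat else ((l.length : Int) + x).toNat) true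

-- allowedDict[x]; exact for 0 ≤ x < 10, the only indices A's reads use under Pre_
def pvGetBit (l : List Bool) (x : Int) : Bool := l.getD x.toNat false

-- 'for x in current: if not allowedDict[int(x)]: return ...' (early-exit validation loop)
def pvBadLoop (d : List Bool) : List Char → Bool
  | [] => false
  | c :: cs => if !(pvGetBit d (pvDigitVal c)) then true else pvBadLoop d cs

-- int(current); exact on the nonempty all-digit strings Pre_ admits
def pvDecVal (cs : List Char) : Int := cs.foldl (fun a c => 10 * a + pvDigitVal c) 0

-- 'for x in R: if allowedDict[x]: r = x; break' with the default r kept when the loop falls through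
def pvFirstHit (d : List Bool) (dflt : Int) : List Int → Int
  | [] => dflt
  | x :: xs => if pvGetBit d x then x else pvFirstHit d dflt xs

-- A's final 'for i in range(len(result)-1, -1, -1)' loop; fuel i+1 means position i is inspected next;
-- fuel 0 = the loop fell through (Python returns None there; unreachable under Pre_).
-- string concatenation / ''.join(result) ported as PySem.Str.join of the one-char pieces.
def pvScan (d : List Bool) (maxBit minBit : Int) (res : List Char) : Nat → String
  | 0 => ""
  | i + 1 =>
    let x := pvDigitVal (res.getD i ' ')
    if x < maxBit then
      let nextX := pvFirstHit d 0 (PySem.List.pyRange (x + 1) 10 1)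
      PySem.Str.join "" ((res.take i).map (fun c => String.ofList [c]) ++ [PySem.Int.toStr nextX] ++ List.replicate (res.length - (i + 1)) (PySem.Int.toStr minBit))
    else pvScan d maxBit minBit res i

def nextInteger (allowed : List Int) (current : String) : String :=
  let dict := allowed.foldl pvSetTrue (List.replicate 10 false)
  let cs := current.toList
  if pvBadLoop dict cs then "INVALID INPUT"
  else if pvDecVal cs == 0 || PySem.Str.pyGet? current 0 == some '0' then "INVALID INPUT"
  else
    let maxBit := pvFirstHit dict 0 (PySem.List.pyRange 9 0 (-1))
    let minNonZeroBit := pvFirstHit dict 9 (PySem.List.pyRange 1 9 1)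
    let minBit := if pvGetBit dict 0 then (0 : Int) else minNonZeroBit
    -- str(maxBit) * len(current), and str(minNonZeroBit) + str(minBit) * len(current), as joins
    if current == PySem.Str.join "" (List.replicate cs.length (PySem.Int.toStr maxBit)) then
      PySem.Str.join "" (PySem.Int.toStr minNonZeroBit :: List.replicate cs.length (PySem.Int.toStr minBit))
    else pvScan dict maxBit minBit cs cs.length

-- ===== PORT B =====
-- int(c) as Source B applies it (only ever evaluated on digit chars there)
def pvDigitValB (c : Char) : Int := (c.toNat : Int) - 48

-- the decode loop 'for _ in range(L - 1): r, k = divmod(r, m); rest.append(digits[k])':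
-- returns the final r together with rest (least-significant digit first); divmod is ported as
-- floordiv/mod (exact: m ≥ 1 whenever Source B reaches the loop) and digits[k] as getD (the index is
-- in range whenever Source B reaches it)
def pvDecode (digits : List Int) (m : Int) : Nat → Int → Int × List Int
  | 0, r => (r, [])
  | n + 1, r =>
    let k := PySem.Int.mod r m
    let res := pvDecode digits m n (PySem.Int.floordiv r m)
    (res.1, digits.getD k.toNat 0 :: res.2)

def nextInteger_alt (allowed : List Int) (current : String) : String :=
  let digits := PySem.List.sorted (PySem.Set.ofList allowed) (fun x => x) false
  let cs := current.toList
  -- any(int(c) not in dset for c in current): on the inputs Pre_ admits a disallowed digit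
  -- precedes any non-digit char, so the early-exit generator's value agrees with .any
  if cs.any (fun c => !(PySem.Set.contains (PySem.Set.ofList digits) (pvDigitValB c))) then "INVALID INPUT"
  -- current[0] raises IndexError on the empty string in Python; Pre_ excludes it
  else if cs.headD ' ' == '0' then "INVALID INPUT"
  else
    let nz := digits.filter (fun d => !(d == 0))
    let m : Int := digits.length
    let p : Int := nz.length
    let L := cs.length
    -- nz.index(...) / digits.index(...): the element is present whenever Source B reaches the call
    let r0 : Int := ((PySem.List.index? nz (pvDigitValB (cs.headD ' '))).getD 0 : Nat)
    let r1 := (cs.drop 1).foldl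
      (fun a c => a * m + (((PySem.List.index? digits (pvDigitValB c)).getD 0 : Nat) : Int)) r0
    let r2 := r1 + 1
    -- 'if r >= p * m ** (L - 1): L += 1; r = 0'
    let Lr := if p * m ^ (L - 1) ≤ r2 then (L + 1, (0 : Int)) else (L, r2)
    let fr := pvDecode digits m (Lr.1 - 1) Lr.2
    -- str(nz[r]) + ''.join(str(d) for d in reversed(rest))
    PySem.Str.join "" (PySem.Int.toStr (nz.getD fr.1.toNat 0) :: ((fr.2.reverse).map PySem.Int.toStr))

-- ===== PRECONDITION & SPEC =====
-- Pre_ = the inputs on which A returns, minus the quirk region where values in [-10,-1] wrap A's boolean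
-- table into extra digits (e.g. allowed=[-1] enables digit 9; B treats them as non-digits; |x| ≥ 10 raises
-- IndexError): current must be nonempty and either (no negatives, and current all digits or with a
-- disallowed digit before its first non-digit — elsewhere int() raises ValueError), or current has a digit
-- before its first non-digit that is disallowed even after wraparound, or is an all-digit string with a
-- leading zero — in the last two shapes both A and B answer INVALID INPUT whatever wraparound adds.
def Pre_nextInteger (allowed : List Int) (current : String) : Prop :=
  (∀ x ∈ allowed, -10 ≤ x ∧ x ≤ 9) ∧ current.toList ≠ [] ∧
    (((∀ x ∈ allowed, 0 ≤ x) ∧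
      (current.toList.all PySem.Chars.isdigit = true ∨
       (current.toList.takeWhile PySem.Chars.isdigit).any
         (fun c => !(decide (((c.toNat : Int) - 48) ∈ allowed))) = true)) ∨
     (current.toList.takeWhile PySem.Chars.isdigit).any
       (fun c => !(decide (((c.toNat : Int) - 48) ∈ allowed)) &&
                 !(decide ((((c.toNat : Int) - 48) - 10) ∈ allowed))) = true ∨
     (current.toList.all PySem.Chars.isdigit = true ∧ current.toList.headD ' ' = '0'))
instance (allowed : List Int) (current : String) : Decidable (Pre_nextInteger allowed current) := by
  unfold Pre_nextInteger; infer_instance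
def pvWitness_nextInteger : List Int × String := ([1, 2, 0], "12")

def Spec_nextInteger (allowed : List Int) (current : String) (out : String) : Prop := out = nextInteger_alt allowed current
instance (allowed : List Int) (current : String) (out : String) : Decidable (Spec_nextInteger allowed current out) := by unfold Spec_nextInteger; infer_instance

-- ===== CLAIM (what is proved, stated in full; the proofs are below) =====
def Claim_equal_nextInteger : Prop := ∀ (allowed : List Int) (current : String), Dom_nextInteger allowed current → Pre_nextInteger allowed current → Spec_nextInteger allowed current (nextInteger allowed current)

-- ===== LEMMAS AND PROOFS =====

-- proof-side successor of a valid-number digit list, read least-significant digit first: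
-- positions holding the largest allowed digit become the smallest allowed digit (carry), the first
-- smaller digit is bumped to the least allowed digit above it; all digits maximal = one more digit
def pvCarry (maxB minB minNZ : Int) (ordered : List Int) : List Int → List Int
  | [] => [minNZ]
  | x :: xs =>
    if x == maxB then minB :: pvCarry maxB minB minNZ ordered xs
    else ((ordered.find? (fun e => decide (x < e))).getD 0) :: xs

-- the char with digit value d (proof-side helper)
def pvDigitChar (d : Int) : Char := Char.ofNat (48 + d.toNat)

theorem pv_isdigit_bounds (c : Char) (h : PySem.Chars.isdigit c = true) :
    48 ≤ c.toNat ∧ c.toNat ≤ 57 := by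
  simp only [PySem.Chars.isdigit, Bool.and_eq_true, decide_eq_true_eq] at h
  obtain ⟨h1, h2⟩ := h
  rw [Char.le_def, UInt32.le_iff_toNat_le] at h1 h2
  simp only [Char.toNat] at *
  exact ⟨h1, h2⟩

theorem pv_digitChar_val (c : Char) (h : PySem.Chars.isdigit c = true) :
    pvDigitChar (pvDigitVal c) = c := by
  obtain ⟨h1, h2⟩ := pv_isdigit_bounds c h
  have h3 : 48 + ((c.toNat : Int) - 48).toNat = c.toNat := by omega
  simp only [pvDigitChar, pvDigitVal, h3, Char.ofNat_toNat]

theorem pv_val_digitChar (d : Int) (h0 : 0 ≤ d) (h9 : d ≤ 9) :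
    pvDigitVal (pvDigitChar d) = d := by
  interval_cases d <;> decide

theorem pv_toChars_digit (d : Int) (h0 : 0 ≤ d) (h9 : d ≤ 9) :
    (PySem.Int.toStr d).toList = [pvDigitChar d] := by
  interval_cases d <;> decide

theorem pv_str_ext {s t : String} (h : s.toList = t.toList) : s = t :=
  String.toList_injective h

theorem pv_join_empty (css : List (List Char)) : PySem.Chars.join [] css = css.flatten := by
  induction css with
  | nil => simp [PySem.Chars.join_nil]
  | cons a t ih =>
    cases t with
    | nil => simp [PySem.Chars.join, List.intercalate]
    | cons b u => simp_all [PySem.Chars.join_cons_cons]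

theorem pv_join_toList (parts : List String) :
    (PySem.Str.join "" parts).toList = (parts.map String.toList).flatten := by
  rw [PySem.Str.toList_join]
  have : ("" : String).toList = [] := rfl
  rw [this, pv_join_empty]

theorem pv_flatten_singletons {α β : Type} (f : α → β) (l : List α) :
    (l.map (fun x => [f x])).flatten = l.map f := by
  induction l with
  | nil => rfl
  | cons a t ih => simp [ih]

-- dict characterization (wraparound included: index x < 0 sets bit 10 + x)
theorem pv_getBit_foldl (allowed : List Int) (h : ∀ x ∈ allowed, -10 ≤ x ∧ x ≤ 9)
    (init : List Bool) (hlen : init.length = 10) (j : Int) (hj0 : 0 ≤ j) (hj9 : j ≤ 9) :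
    pvGetBit (allowed.foldl pvSetTrue init) j =
      (pvGetBit init j || (decide (j ∈ allowed) || decide (j - 10 ∈ allowed))) := by
  induction allowed generalizing init with
  | nil => simp
  | cons x xs ih =>
    obtain ⟨hx0, hx9⟩ := h x (by simp)
    have hstep : pvGetBit (pvSetTrue init x) j =
        (pvGetBit init j || (decide (j = x) || decide (j - 10 = x))) := by
      simp only [pvSetTrue, pvGetBit, List.getD, List.getElem?_set, hlen]
      by_cases h0x : 0 ≤ x
      · simp only [h0x, if_true]
        by_cases hxj : x = j
        · subst hxj; simp [show x.toNat < 10 by omega, show ¬(x - 10 = x) by omega]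
        · have h1 : x.toNat ≠ j.toNat := by omega
          have h2 : ¬(j = x) := fun hh => hxj hh.symm
          have h3 : ¬(j - 10 = x) := by omega
          simp [h1, h2, h3]
      · simp only [h0x, if_false]
        by_cases hxj : j - 10 = x
        · have h1 : ((10 : Int) + x).toNat = j.toNat := by omega
          simp [h1, show j.toNat < 10 by omega, show ¬(j = x) by omega, hxj]
        · have h1 : ((10 : Int) + x).toNat ≠ j.toNat := by omega
          simp [h1, show ¬(j = x) by omega, hxj]
    rw [List.foldl_cons, ih (fun y hy => h y (by simp [hy])) _ (by
      simp only [pvSetTrue, List.length_set, hlen]), hstep]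
    by_cases h1 : j = x <;> by_cases h2 : j - 10 = x <;>
      by_cases h3 : j ∈ xs <;> by_cases h4 : j - 10 ∈ xs <;>
      simp [h1, h2, h3, h4]

theorem pvB_val_eq : pvDigitValB = pvDigitVal := rfl

theorem pv_any_congr {α : Type} (p q : α → Bool) (l : List α)
    (h : ∀ c ∈ l, p c = q c) : l.any p = l.any q := by
  induction l with
  | nil => rfl
  | cons a t ih => simp only [List.any_cons, h a (by simp), ih (fun c hc => h c (by simp [hc]))]

theorem pv_badLoop_eq_any (d : List Bool) (cs : List Char) :
    pvBadLoop d cs = cs.any (fun c => !(pvGetBit d (pvDigitVal c))) := by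
  induction cs with
  | nil => rfl
  | cons c t ih =>
    simp only [pvBadLoop, List.any_cons]
    by_cases hc : pvGetBit d (pvDigitVal c) = true <;> simp [hc, ih]

theorem pv_decVal_pos (cs : List Char) (a : Int) (ha : 0 < a)
    (hd : ∀ c ∈ cs, PySem.Chars.isdigit c = true) :
    0 < cs.foldl (fun a c => 10 * a + pvDigitVal c) a := by
  induction cs generalizing a with
  | nil => exact ha
  | cons c t ih =>
    obtain ⟨h1, h2⟩ := pv_isdigit_bounds c (hd c (by simp))
    refine ih _ (by simp only [pvDigitVal]; omega) (fun c hc => hd c (by simp [hc]))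

-- A's 'for x in range(9, 0, -1)' search is the largest nonzero allowed digit
set_option maxHeartbeats 1000000 in
theorem pv_maxBit_spec (d : List Bool) (allowed : List Int)
    (hall : ∀ x ∈ allowed, 0 ≤ x ∧ x ≤ 9)
    (hdict : ∀ j : Int, 0 ≤ j → j ≤ 9 → pvGetBit d j = decide (j ∈ allowed))
    (m : Int) (hm : m ∈ allowed) (hm0 : m ≠ 0) :
    pvFirstHit d 0 (PySem.List.pyRange 9 0 (-1)) ∈ allowed ∧
    pvFirstHit d 0 (PySem.List.pyRange 9 0 (-1)) ≠ 0 ∧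
    ∀ y ∈ allowed, y ≠ 0 → y ≤ pvFirstHit d 0 (PySem.List.pyRange 9 0 (-1)) := by
  have hr : PySem.List.pyRange 9 0 (-1) = [9, 8, 7, 6, 5, 4, 3, 2, 1] := by decide
  rw [hr]
  simp only [pvFirstHit]
  rw [hdict 9 (by norm_num) (by norm_num), hdict 8 (by norm_num) (by norm_num),
      hdict 7 (by norm_num) (by norm_num), hdict 6 (by norm_num) (by norm_num),
      hdict 5 (by norm_num) (by norm_num), hdict 4 (by norm_num) (by norm_num),
      hdict 3 (by norm_num) (by norm_num), hdict 2 (by norm_num) (by norm_num),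
      hdict 1 (by norm_num) (by norm_num)]
  split_ifs with h9 h8 h7 h6 h5 h4 h3 h2 h1
  all_goals simp only [decide_eq_true_eq] at *
  all_goals first
  | (refine ⟨by assumption, by norm_num, fun y hy hy0 => ?_⟩
     obtain ⟨hy0', hy9⟩ := hall y hy
     interval_cases y <;> simp_all)
  | (exfalso; obtain ⟨hm0', hm9⟩ := hall m hm; interval_cases m <;> simp_all)

-- A's 'for x in range(1, 9)' search (default 9) is the smallest nonzero allowed digit
set_option maxHeartbeats 1000000 in
theorem pv_minNZ_spec (d : List Bool) (allowed : List Int)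
    (hall : ∀ x ∈ allowed, 0 ≤ x ∧ x ≤ 9)
    (hdict : ∀ j : Int, 0 ≤ j → j ≤ 9 → pvGetBit d j = decide (j ∈ allowed))
    (m : Int) (hm : m ∈ allowed) (hm0 : m ≠ 0) :
    pvFirstHit d 9 (PySem.List.pyRange 1 9 1) ∈ allowed ∧
    pvFirstHit d 9 (PySem.List.pyRange 1 9 1) ≠ 0 ∧
    ∀ y ∈ allowed, y ≠ 0 → pvFirstHit d 9 (PySem.List.pyRange 1 9 1) ≤ y := by
  have hr : PySem.List.pyRange 1 9 1 = [1, 2, 3, 4, 5, 6, 7, 8] := by decide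
  rw [hr]
  simp only [pvFirstHit]
  rw [hdict 1 (by norm_num) (by norm_num), hdict 2 (by norm_num) (by norm_num),
      hdict 3 (by norm_num) (by norm_num), hdict 4 (by norm_num) (by norm_num),
      hdict 5 (by norm_num) (by norm_num), hdict 6 (by norm_num) (by norm_num),
      hdict 7 (by norm_num) (by norm_num), hdict 8 (by norm_num) (by norm_num)]
  split_ifs with h1 h2 h3 h4 h5 h6 h7 h8
  all_goals simp only [decide_eq_true_eq] at *
  all_goals first
  | (refine ⟨by assumption, by norm_num, fun y hy hy0 => ?_⟩
     obtain ⟨hy0', hy9⟩ := hall y hy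
     interval_cases y <;> simp_all)
  | (have h99 : (9 : Int) ∈ allowed := by
       obtain ⟨hm0', hm9⟩ := hall m hm
       interval_cases m <;> simp_all
     refine ⟨h99, by norm_num, fun y hy hy0 => ?_⟩
     obtain ⟨hy0', hy9⟩ := hall y hy
     interval_cases y <;> simp_all)

-- A's inner 'for j in range(x+1, 10)' search is the least allowed digit ≥ a
theorem pv_firstHit_asc (d : List Bool) (allowed : List Int)
    (hall : ∀ x ∈ allowed, 0 ≤ x ∧ x ≤ 9)
    (hdict : ∀ j : Int, 0 ≤ j → j ≤ 9 → pvGetBit d j = decide (j ∈ allowed)) :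
    ∀ (n : Nat) (a : Int), 0 ≤ a → (10 - a).toNat = n → (∃ y ∈ allowed, a ≤ y) →
    pvFirstHit d 0 (PySem.List.pyRange a 10 1) ∈ allowed ∧
    a ≤ pvFirstHit d 0 (PySem.List.pyRange a 10 1) ∧
    ∀ y ∈ allowed, a ≤ y → pvFirstHit d 0 (PySem.List.pyRange a 10 1) ≤ y := by
  intro n
  induction n with
  | zero =>
    intro a ha0 hfuel hex
    obtain ⟨y, hy, hay⟩ := hex
    obtain ⟨_, hy9⟩ := hall y hy
    exact absurd hay (by omega)
  | succ n ih =>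
    intro a ha0 hfuel hex
    obtain ⟨y, hy, hay⟩ := hex
    obtain ⟨hy0, hy9⟩ := hall y hy
    have ha10 : a < 10 := by omega
    rw [PySem.List.pyRange_one_cons ha10]
    simp only [pvFirstHit]
    rw [hdict a ha0 (by omega)]
    by_cases hmem : a ∈ allowed
    · simp [hmem]
    · simp [hmem]
      have hstep := ih (a + 1) (by omega) (by omega)
        ⟨y, hy, by rcases lt_or_eq_of_le hay with h | h; omega; exact absurd (h ▸ hy) hmem⟩
      exact ⟨hstep.1, by omega, fun y' hy' hay' => hstep.2.2 y' hy'
        (by rcases lt_or_eq_of_le hay' with h | h; omega; exact absurd (h ▸ hy') hmem)⟩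

-- B-side order facts
theorem pv_getLastD_mem (l : List Int) (h : l ≠ []) : l.getLastD 0 ∈ l := by
  induction l with
  | nil => exact absurd rfl h
  | cons a t ih =>
    cases t with
    | nil => simp
    | cons b u => simpa using Or.inr (ih (by simp))

theorem pv_getLastD_max (l : List Int) (h : l.Pairwise (· < ·)) :
    ∀ y ∈ l, y ≤ l.getLastD 0 := by
  induction l with
  | nil => simp
  | cons a t ih =>
    intro y hy
    rcases List.mem_cons.mp hy with rfl | hyt
    · cases t with
      | nil => simp
      | cons b u =>
        have hle := (List.pairwise_cons.mp h).1
        have := ih (List.pairwise_cons.mp h).2 b (by simp)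
        simp only [List.getLastD_cons] at *
        exact le_trans (le_of_lt (hle b (by simp))) this
    · cases t with
      | nil => simp at hyt
      | cons b u =>
        have := ih (List.pairwise_cons.mp h).2 y hyt
        simpa using this

theorem pv_headD_min (l : List Int) (h : l.Pairwise (· < ·)) :
    ∀ y ∈ l, l.headD 0 ≤ y := by
  cases l with
  | nil => simp
  | cons a t =>
    intro y hy
    rcases List.mem_cons.mp hy with rfl | hyt
    · simp
    · simpa using le_of_lt ((List.pairwise_cons.mp h).1 y hyt)

theorem pv_headD_mem (l : List Int) (h : l ≠ []) : l.headD 0 ∈ l := by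
  cases l with
  | nil => exact absurd rfl h
  | cons a t => simp

-- next(e for e in ordered if e > x) on a strictly increasing list is the least element > x
theorem pv_find_least (l : List Int) (h : l.Pairwise (· < ·)) (x m : Int)
    (hm : m ∈ l) (hxm : x < m) :
    (l.find? (fun e => decide (x < e))).getD 0 ∈ l ∧
    x < (l.find? (fun e => decide (x < e))).getD 0 ∧
    ∀ y ∈ l, x < y → (l.find? (fun e => decide (x < e))).getD 0 ≤ y := by
  induction l with
  | nil => simp at hm
  | cons a t ih =>
    by_cases hxa : x < a
    · rw [List.find?_cons_of_pos (by simpa using hxa)]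
      simp only [Option.getD_some]
      refine ⟨List.mem_cons_self, hxa, fun y hy _ => ?_⟩
      rcases List.mem_cons.mp hy with rfl | hyt
      · exact le_refl y
      · exact le_of_lt ((List.pairwise_cons.mp h).1 y hyt)
    · have hma : m ≠ a := fun he => hxa (he ▸ hxm)
      have hmt : m ∈ t := by rcases List.mem_cons.mp hm with rfl | h; exact absurd rfl hma; exact h
      have := ih (List.pairwise_cons.mp h).2 hmt
      rw [List.find?_cons_of_neg (by simpa using hxa)]
      refine ⟨by simp [this.1], this.2.1, fun y hy hxy => ?_⟩
      rcases List.mem_cons.mp hy with rfl | hyt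
      · exact absurd hxy hxa
      · exact this.2.2 y hyt hxy

-- carry pass: leading max digits become min digits
theorem pv_carry_replicate (M m mz : Int) (ord : List Int) (k : Nat) (l : List Int) :
    pvCarry M m mz ord (List.replicate k M ++ l) =
      List.replicate k m ++ pvCarry M m mz ord l := by
  induction k with
  | zero => simp
  | succ n ih => simp [pvCarry, List.replicate_succ, ih]

theorem pv_carry_hit (M m mz x : Int) (ord : List Int) (xs : List Int) (hx : x ≠ M) :
    pvCarry M m mz ord (x :: xs) = ((ord.find? (fun e => decide (x < e))).getD 0) :: xs := by
  simp [pvCarry, hx]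

-- A's index loop skips trailing positions that hold the max digit
theorem pv_scan_skip (d : List Bool) (M m : Int) (res : List Char) (k i : Nat)
    (hmax : ∀ j : Nat, i ≤ j → j < i + k → pvDigitVal (res.getD j ' ') = M) :
    pvScan d M m res (i + k) = pvScan d M m res i := by
  induction k with
  | zero => rfl
  | succ n ih =>
    have hik : i + (n + 1) = (i + n) + 1 := by omega
    rw [hik]
    simp only [pvScan]
    rw [hmax (i + n) (by omega) (by omega)]
    simp only [lt_irrefl, if_false]
    exact ih (fun j hj1 hj2 => hmax j hj1 (by omega))

theorem pv_dropWhile_head {α : Type} (p : α → Bool) (l : List α) (d : α) (t : List α)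
    (h : l.dropWhile p = d :: t) : p d = false := by
  induction l with
  | nil => simp at h
  | cons a u ih =>
    by_cases ha : p a = true
    · rw [List.dropWhile_cons_of_pos ha] at h; exact ih h
    · rw [List.dropWhile_cons_of_neg ha] at h
      cases h; simpa using ha

-- str(digits) joined back is the digit chars
theorem pv_join_digits (l : List Int) (h : ∀ y ∈ l, 0 ≤ y ∧ y ≤ 9) :
    (PySem.Str.join "" (l.map PySem.Int.toStr)).toList = l.map pvDigitChar := by
  rw [pv_join_toList, List.map_map]
  have : l.map (String.toList ∘ PySem.Int.toStr) = l.map (fun y => [pvDigitChar y]) :=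
    List.map_congr_left (fun y hy => pv_toChars_digit y (h y hy).1 (h y hy).2)
  rw [this, pv_flatten_singletons]

theorem pv_flatten_replicate {α : Type} (n : Nat) (a : α) :
    (List.replicate n [a]).flatten = List.replicate n a := by
  induction n with
  | zero => rfl
  | succ k ih => simp [List.replicate_succ, ih]

-- the branch after validation: A's all-max test + index scan equals the carry pass on the
-- reversed digit values
theorem pv_core (allowed : List Int) (current : String) (cs : List Char) (dict : List Bool)
    (hcs : current.toList = cs)
    (hall : ∀ x ∈ allowed, 0 ≤ x ∧ x ≤ 9)
    (hdict : ∀ j : Int, 0 ≤ j → j ≤ 9 → pvGetBit dict j = decide (j ∈ allowed))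
    (hdig : ∀ c ∈ cs, PySem.Chars.isdigit c = true)
    (hmem : ∀ c ∈ cs, pvDigitVal c ∈ allowed)
    (M mz m : Int) (ordered : List Int)
    (hM1 : M ∈ allowed) (hM3 : ∀ y ∈ allowed, y ≠ 0 → y ≤ M)
    (hz1 : mz ∈ allowed) (hz2 : mz ≠ 0)
    (hmd : m = 0 ∨ m = mz)
    (hord : ∀ y : Int, y ∈ ordered ↔ y ∈ allowed) (holt : ordered.Pairwise (· < ·)) :
    (if current == PySem.Str.join "" (List.replicate cs.length (PySem.Int.toStr M))
     then PySem.Str.join "" (PySem.Int.toStr mz :: List.replicate cs.length (PySem.Int.toStr m))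
     else pvScan dict M m cs cs.length)
    = PySem.Str.join "" (((pvCarry M m mz ordered ((cs.reverse).map pvDigitVal)).reverse).map PySem.Int.toStr) := by
  obtain ⟨hM0, hM9⟩ := hall M hM1
  obtain ⟨hz0, hz9⟩ := hall mz hz1
  have hmb : 0 ≤ m ∧ m ≤ 9 := by rcases hmd with rfl | rfl; constructor <;> norm_num; exact ⟨hz0, hz9⟩
  have hDmem : ∀ v ∈ cs.map pvDigitVal, v ∈ allowed := by
    intro v hv; obtain ⟨c, hc, rfl⟩ := List.mem_map.mp hv; exact hmem c hc
  have hcsD : cs = (cs.map pvDigitVal).map pvDigitChar := by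
    rw [List.map_map]
    conv_lhs => rw [← List.map_id cs]
    exact (List.map_congr_left (fun c hc => (pv_digitChar_val c (hdig c hc)).symm))
  have hrevD : (cs.reverse).map pvDigitVal = (cs.map pvDigitVal).reverse := by
    rw [List.map_reverse]
  have hrevmem : ∀ v ∈ (cs.reverse).map pvDigitVal, v ∈ allowed := by
    intro v hv; rw [hrevD, List.mem_reverse] at hv; exact hDmem v hv
  have hrevle : ∀ v ∈ (cs.reverse).map pvDigitVal, v ≤ M := by
    intro v hv
    rcases eq_or_ne v 0 with rfl | hv0
    · omega
    · exact hM3 v (hrevmem v hv) hv0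
  have hsplit : (cs.reverse).map pvDigitVal =
      List.replicate ((((cs.reverse).map pvDigitVal).takeWhile (fun v => v == M)).length) M ++
      ((cs.reverse).map pvDigitVal).dropWhile (fun v => v == M) := by
    conv_lhs => rw [← List.takeWhile_append_dropWhile (p := fun v => v == M)
      (l := (cs.reverse).map pvDigitVal)]
    congr 1
    exact List.eq_replicate_of_mem (fun b hb => by
      have := List.mem_takeWhile_imp hb; simpa using this)
  set rev := (cs.reverse).map pvDigitVal with hrev
  set k := ((rev.takeWhile (fun v => v == M)).length) with hkdef
  set t := rev.dropWhile (fun v => v == M) with htdef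
  have hlenrev : rev.length = cs.length := by simp [hrev]
  cases htc : t with
  | nil =>
    have hrep : rev = List.replicate k M := by rw [hsplit, htc, List.append_nil]
    have hk : k = cs.length := by
      have := congrArg List.length hrep
      simp only [hlenrev, List.length_replicate] at this
      omega
    have hDrep : cs.map pvDigitVal = List.replicate cs.length M := by
      have : (cs.map pvDigitVal).reverse = List.replicate k M := by rw [← hrevD, hrep]
      have h2 := congrArg List.reverse this
      simpa [hk] using h2
    have hcsrep : cs = List.replicate cs.length (pvDigitChar M) := by
      conv_lhs => rw [hcsD, hDrep]
      rw [List.map_replicate]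
    have hcond : current = PySem.Str.join "" (List.replicate cs.length (PySem.Int.toStr M)) := by
      apply pv_str_ext
      rw [hcs, pv_join_toList, List.map_replicate, pv_toChars_digit M hM0 hM9,
        pv_flatten_replicate, ← hcsrep]
    rw [if_pos (beq_iff_eq.mpr hcond)]
    apply pv_str_ext
    have hcar : pvCarry M m mz ordered rev = List.replicate k m ++ [mz] := by
      rw [hrep, ← List.append_nil (List.replicate k M), pv_carry_replicate]
      rfl
    rw [hcar, pv_join_toList, pv_join_digits _ (by
      intro y hy
      rw [List.mem_reverse] at hy
      simp only [List.mem_append, List.mem_replicate, List.mem_singleton] at hy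
      rcases hy with ⟨_, rfl⟩ | rfl
      · exact hmb
      · exact ⟨hz0, hz9⟩)]
    simp [pv_toChars_digit mz hz0 hz9, pv_toChars_digit m hmb.1 hmb.2,
      List.map_replicate, hk]
  | cons dlow post =>
    have hdne : dlow ≠ M := by
      have := pv_dropWhile_head (fun v => v == M) rev dlow post (htdef ▸ htc)
      simpa using this
    have hdrev : dlow ∈ rev := by rw [hsplit, htc]; simp
    have hdmem : dlow ∈ allowed := hrevmem dlow hdrev
    obtain ⟨hd0, hd9⟩ := hall dlow hdmem
    have hdlt : dlow < M := lt_of_le_of_ne (hrevle dlow hdrev) hdne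
    set p := post.length with hpdef
    have hpostmem : ∀ v ∈ post, v ∈ allowed := by
      intro v hv
      exact hrevmem v (by rw [hsplit, htc]; simp [hv])
    have hlen : cs.length = k + (p + 1) := by
      have := congrArg List.length hsplit
      rw [htc] at this
      simp only [List.length_append, List.length_replicate, List.length_cons] at this
      omega
    have hDdec : cs.map pvDigitVal = post.reverse ++ dlow :: List.replicate k M := by
      have : (cs.map pvDigitVal).reverse = List.replicate k M ++ dlow :: post := by
        rw [← hrevD, hsplit, htc]
      have h2 := congrArg List.reverse this
      simpa using h2
    have hcsdec : cs = (post.reverse.map pvDigitChar) ++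
        pvDigitChar dlow :: List.replicate k (pvDigitChar M) := by
      conv_lhs => rw [hcsD, hDdec]
      simp [List.map_replicate]
    have hcond : (current == PySem.Str.join "" (List.replicate cs.length (PySem.Int.toStr M))) = false := by
      apply beq_eq_false_iff_ne.mpr
      intro he
      have h1 : cs = List.replicate cs.length (pvDigitChar M) := by
        have := congrArg String.toList he
        rwa [hcs, pv_join_toList, List.map_replicate, pv_toChars_digit M hM0 hM9,
          pv_flatten_replicate] at this
      have h2 : dlow = M := by
        have h3 : cs.map pvDigitVal = List.replicate cs.length M := by
          rw [h1]
          rw [List.map_replicate, List.length_replicate, pv_val_digitChar M hM0 hM9]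
        have h4 : dlow ∈ List.replicate cs.length M := by
          have : dlow ∈ (cs.map pvDigitVal).reverse := by rw [← hrevD]; exact hdrev
          rw [List.mem_reverse] at this
          rwa [h3] at this
        exact (List.eq_of_mem_replicate h4)
      exact hdne h2
    rw [hcond]
    simp only [Bool.false_eq_true, if_false]
    have hscan : pvScan dict M m cs cs.length = pvScan dict M m cs (p + 1) := by
      rw [show cs.length = (p + 1) + k from by omega]
      apply pv_scan_skip dict M m cs k (p + 1)
      intro j hj1 hj2
      have hgt : cs.getD j ' ' = pvDigitChar M := by
        rw [hcsdec, List.getD_append_right _ _ _ _ (by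
          simp only [List.length_map, List.length_reverse]; omega)]
        have hlp : (post.reverse.map pvDigitChar).length = p := by
          simp only [List.length_map, List.length_reverse]; omega
        rw [hlp]
        have : j - p = (j - p - 1) + 1 := by omega
        rw [this, List.getD_cons_succ, List.getD_replicate _ (by omega)]
      rw [hgt, pv_val_digitChar M hM0 hM9]
    rw [hscan]
    simp only [pvScan]
    have hgetp : cs.getD p ' ' = pvDigitChar dlow := by
      rw [hcsdec, List.getD_append_right _ _ _ _ (by
        simp only [List.length_map, List.length_reverse]; omega)]
      have hlp : (post.reverse.map pvDigitChar).length = p := by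
        simp only [List.length_map, List.length_reverse]; omega
      rw [hlp, Nat.sub_self]
      rfl
    rw [hgetp, pv_val_digitChar dlow hd0 hd9]
    rw [if_pos (by exact_mod_cast hdlt)]
    have hnx := pv_firstHit_asc dict allowed hall hdict (10 - (dlow + 1)).toNat (dlow + 1)
      (by omega) rfl ⟨M, hM1, by omega⟩
    have hfd := pv_find_least ordered holt dlow M ((hord M).mpr hM1) hdlt
    have hsx : pvFirstHit dict 0 (PySem.List.pyRange (dlow + 1) 10 1) =
        (ordered.find? (fun e => decide (dlow < e))).getD 0 := by
      apply le_antisymm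
      · exact hnx.2.2 _ ((hord _).mp hfd.1) (by omega)
      · exact hfd.2.2 _ ((hord _).mpr hnx.1) (by omega)
    apply pv_str_ext
    obtain ⟨hx0, hx9⟩ := hall _ hnx.1
    have hcarry : pvCarry M m mz ordered rev =
        List.replicate k m ++ ((ordered.find? (fun e => decide (dlow < e))).getD 0) :: post := by
      rw [hsplit, htc, pv_carry_replicate, pv_carry_hit _ _ _ _ _ _ hdne]
    have hx0' : 0 ≤ (ordered.find? (fun e => decide (dlow < e))).getD 0 := hsx ▸ hx0
    have hx9' : (ordered.find? (fun e => decide (dlow < e))).getD 0 ≤ 9 := hsx ▸ hx9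
    rw [hcarry, pv_join_toList, pv_join_digits _ (by
      intro y hy
      simp only [List.mem_reverse, List.mem_append, List.mem_cons, List.mem_replicate] at hy
      rcases hy with ⟨_, rfl⟩ | hy2 | hy3
      · exact hmb
      · exact hy2 ▸ ⟨hx0', hx9'⟩
      · exact hall y (hpostmem y hy3))]
    have htake : cs.take p = post.reverse.map pvDigitChar := by
      rw [hcsdec]
      exact List.take_left' (by simp only [List.length_map, List.length_reverse]; omega)
    rw [htake, show cs.length - (p + 1) = k from by omega]
    simp only [List.map_append, List.map_map, List.map_replicate, List.flatten_append]
    have h1 : ((post.reverse).map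
        (String.toList ∘ (fun c => String.ofList [c]) ∘ pvDigitChar)).flatten
        = post.reverse.map pvDigitChar := by
      have hfx : ∀ x : Int, (String.toList ∘ (fun c => String.ofList [c]) ∘ pvDigitChar) x
          = [pvDigitChar x] := fun x => by simp
      rw [funext hfx]
      exact pv_flatten_singletons pvDigitChar _
    rw [h1]
    have hxc : PySem.Int.toChars ((ordered.find? (fun e => decide (dlow < e))).getD 0)
        = [pvDigitChar ((ordered.find? (fun e => decide (dlow < e))).getD 0)] :=
      (PySem.Int.toList_toStr _).symm.trans (pv_toChars_digit _ hx0' hx9')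
    simp only [List.map_cons, List.map_nil,
      pv_toChars_digit m hmb.1 hmb.2, List.flatten_cons, List.flatten_nil,
      pv_flatten_replicate, hsx]
    simp [List.map_reverse, hxc]

-- ===== mixed-radix arithmetic: the carry pass equals encode(+1)/decode =====

-- the value of an index list read most-significant first, in base m
def pvVal (m : Int) (l : List Int) : Int := l.foldl (fun a i => a * m + i) 0

theorem pv_enc_shift (m : Int) (l : List Int) : ∀ a : Int,
    l.foldl (fun a i => a * m + i) a = a * m ^ l.length + pvVal m l := by
  induction l with
  | nil => intro a; simp [pvVal]
  | cons i t ih =>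
    intro a
    have hv : pvVal m (i :: t) = (0 * m + i) * m ^ t.length + pvVal m t := by
      unfold pvVal
      rw [List.foldl_cons]
      exact ih (0 * m + i)
    rw [List.foldl_cons, ih (a * m + i), hv, List.length_cons]
    ring

theorem pv_val_cons (m i : Int) (l : List Int) :
    pvVal m (i :: l) = i * m ^ l.length + pvVal m l := by
  have hv : pvVal m (i :: l) = (0 * m + i) * m ^ l.length + pvVal m l := by
    unfold pvVal
    rw [List.foldl_cons]
    exact pv_enc_shift m l (0 * m + i)
  rw [hv]
  ring

theorem pv_val_append (m : Int) (l l' : List Int) :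
    pvVal m (l ++ l') = pvVal m l * m ^ l'.length + pvVal m l' := by
  unfold pvVal
  rw [List.foldl_append]
  exact pv_enc_shift m l' _

theorem pv_val_rep0 (m : Int) (k : Nat) : pvVal m (List.replicate k 0) = 0 := by
  induction k with
  | zero => rfl
  | succ n ih => rw [List.replicate_succ, pv_val_cons, ih]; ring

theorem pv_val_repmax (m : Int) (k : Nat) :
    pvVal m (List.replicate k (m - 1)) = m ^ k - 1 := by
  induction k with
  | zero => simp [pvVal]
  | succ n ih =>
    rw [List.replicate_succ, pv_val_cons, List.length_replicate, ih, pow_succ]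
    ring

theorem pv_val_bounds (m : Int) (l : List Int) (h : ∀ i ∈ l, 0 ≤ i ∧ i < m) :
    0 ≤ pvVal m l ∧ pvVal m l ≤ m ^ l.length - 1 := by
  induction l with
  | nil => simp [pvVal]
  | cons i t ih =>
    obtain ⟨hi0, him⟩ := h i (by simp)
    obtain ⟨hv0, hv1⟩ := ih (fun x hx => h x (by simp [hx]))
    have hp : (0 : Int) < m ^ t.length := pow_pos (by omega) t.length
    rw [pv_val_cons, List.length_cons, pow_succ]
    constructor
    · positivity
    · nlinarith

theorem pv_decode_spec (D : List Int) (m : Int) (hm : 0 < m) (l : List Int)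
    (h : ∀ i ∈ l, 0 ≤ i ∧ i < m) : ∀ a : Int, 0 ≤ a →
    pvDecode D m l.length (a * m ^ l.length + pvVal m l)
      = (a, (l.map (fun i => D.getD i.toNat 0)).reverse) := by
  induction l using List.reverseRecOn with
  | nil => intro a _; simp [pvDecode, pvVal]
  | append_singleton l' i ih =>
    intro a ha
    obtain ⟨hi0, him⟩ := h i (by simp)
    obtain ⟨hv0, hv1⟩ := pv_val_bounds m l' (fun x hx => h x (by simp [hx]))
    set t := a * m ^ l'.length + pvVal m l' with htdef
    have hiv : pvVal m [i] = i := by simp [pvVal]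
    have hval : a * m ^ (l' ++ [i]).length + pvVal m (l' ++ [i]) = t * m + i := by
      rw [pv_val_append, hiv, List.length_append, List.length_singleton, pow_succ]
      ring
    have hlen : (l' ++ [i]).length = l'.length + 1 := by simp
    rw [hval, hlen]
    have ht0 : 0 ≤ t := by positivity
    have hswap : t * m + i = i + t * m := by ring
    have hdiv : PySem.Int.floordiv (t * m + i) m = t := by
      show (t * m + i).fdiv m = t
      rw [Int.fdiv_eq_ediv, hswap, Int.add_mul_ediv_right _ _ (by omega),
        Int.ediv_eq_zero_of_lt hi0 him]
      simp [show (0:Int) ≤ m by omega]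
    have hswap2 : t * m + i = i + m * t := by ring
    have hmod : PySem.Int.mod (t * m + i) m = i := by
      show (t * m + i).fmod m = i
      rw [Int.fmod_eq_emod, if_pos (Or.inl (show (0:Int) ≤ m by omega)), add_zero,
        hswap2, Int.add_mul_emod_self_left, Int.emod_eq_of_lt hi0 him]
    show (let k := PySem.Int.mod (t * m + i) m;
          let res := pvDecode D m l'.length (PySem.Int.floordiv (t * m + i) m);
          (res.1, D.getD k.toNat 0 :: res.2)) = _
    rw [hmod, hdiv, htdef, ih (fun x hx => h x (by simp [hx])) a ha]
    simp

-- strictly sorted lists: index? / idxOf / getD facts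
theorem pv_index?_mem {α : Type} [BEq α] [LawfulBEq α] (l : List α) (v : α) (h : v ∈ l) :
    PySem.List.index? l v = some (l.idxOf v) := by
  induction l with
  | nil => simp at h
  | cons x t ih =>
    by_cases hx : x = v
    · subst hx
      rw [PySem.List.index?_cons_self, List.idxOf_cons_self]
    · have hv : v ∈ t := by rcases List.mem_cons.mp h with rfl | hh; exact absurd rfl hx; exact hh
      rw [PySem.List.index?_cons_of_ne t hx, ih hv, List.idxOf_cons_ne t hx]
      rfl

theorem pv_getD_eq_getElem {α : Type} [Inhabited α] (l : List α) (n : Nat) (d : α)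
    (h : n < l.length) : l.getD n d = l[n] := by
  simp [List.getD, List.getElem?_eq_getElem h]

theorem pv_getD_idxOf (l : List Int) (v : Int) (h : v ∈ l) : l.getD (l.idxOf v) 0 = v := by
  rw [pv_getD_eq_getElem l _ 0 (List.idxOf_lt_length_of_mem h)]
  exact List.getElem_idxOf _

theorem pv_getLastD_getElem (l : List Int) (h : l ≠ []) :
    l.getLastD 0 = l.getD (l.length - 1) 0 := by
  induction l with
  | nil => exact absurd rfl h
  | cons a t ih =>
    cases t with
    | nil => rfl
    | cons b u =>
      have h1 : (b :: u).getLastD a = (b :: u).getLastD 0 := by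
        rw [List.getLastD_cons, List.getLastD_cons]
      have h2 : (a :: b :: u).length - 1 = ((b :: u).length - 1) + 1 := by simp
      rw [List.getLastD_cons, h1, ih (by simp), h2, List.getD_cons_succ]

theorem pv_sorted_getD_mono_le (l : List Int) (h : l.Pairwise (· < ·)) (i j : Nat)
    (hij : i ≤ j) (hj : j < l.length) : l.getD i 0 ≤ l.getD j 0 := by
  rcases Nat.lt_or_ge i j with hlt | hge
  · rw [pv_getD_eq_getElem l i 0 (by omega), pv_getD_eq_getElem l j 0 hj]
    exact le_of_lt ((List.pairwise_iff_getElem.mp h) i j (by omega) hj hlt)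
  · have : i = j := by omega
    rw [this]

theorem pv_idxOf_last (l : List Int) (h : l.Pairwise (· < ·)) (hne : l ≠ []) :
    l.idxOf (l.getLastD 0) = l.length - 1 := by
  have hl : 0 < l.length := List.length_pos_of_ne_nil hne
  have hg : l.getLastD 0 = l[l.length - 1] := by
    rw [pv_getLastD_getElem l hne, pv_getD_eq_getElem l _ 0 (by omega)]
  rw [hg]
  exact List.Nodup.idxOf_getElem (h.imp ne_of_lt) _ (by omega)

theorem pv_idxOf_succ_lt (l : List Int) (h : l.Pairwise (· < ·)) (v : Int) (hv : v ∈ l)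
    (hne : v ≠ l.getLastD 0) : l.idxOf v + 1 < l.length := by
  have h1 : l.idxOf v < l.length := List.idxOf_lt_length_of_mem hv
  have h2 : l.idxOf v ≠ l.length - 1 := by
    intro he
    apply hne
    rw [← pv_getD_idxOf l v hv, he, pv_getLastD_getElem l (List.ne_nil_of_mem hv)]
  omega

-- the least element greater than a non-maximal member is its index successor
theorem pv_find_succ (l : List Int) (h : l.Pairwise (· < ·)) (v : Int) (hv : v ∈ l)
    (hne : v ≠ l.getLastD 0) :
    (l.find? (fun e => decide (v < e))).getD 0 = l.getD (l.idxOf v + 1) 0 := by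
  set j := l.idxOf v with hjdef
  have hjl : j + 1 < l.length := pv_idxOf_succ_lt l h v hv hne
  have hvj : l[j]'(by omega) = v := List.getElem_idxOf _
  have hs : l.getD (j + 1) 0 = l[j + 1] := pv_getD_eq_getElem l _ 0 hjl
  have hsm : l.getD (j + 1) 0 ∈ l := by rw [hs]; exact List.getElem_mem _
  have hvs : v < l.getD (j + 1) 0 := by
    rw [hs, ← hvj]
    exact (List.pairwise_iff_getElem.mp h) j (j + 1) (by omega) hjl (by omega)
  have hfd := pv_find_least l h v (l.getD (j + 1) 0) hsm hvs
  apply le_antisymm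
  · exact hfd.2.2 _ hsm hvs
  · -- any member above v sits at index ≥ j + 1
    obtain ⟨iy, hiy, hy⟩ := List.mem_iff_getElem.mp hfd.1
    have hge : j + 1 ≤ iy := by
      by_contra hlt
      have : l[iy] ≤ l[j]'(by omega) := by
        rcases Nat.lt_or_ge iy j with h1 | h1
        · exact le_of_lt ((List.pairwise_iff_getElem.mp h) iy j hiy (by omega) h1)
        · have : iy = j := by omega
          simp [this]
      rw [hvj] at this
      rw [hy] at this
      exact absurd hfd.2.1 (by omega)
    calc l.getD (j + 1) 0 ≤ l.getD iy 0 := pv_sorted_getD_mono_le l h _ _ hge (by omega)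
    _ = (l.find? (fun e => decide (v < e))).getD 0 := by
        rw [pv_getD_eq_getElem l _ 0 hiy, hy]

-- a strictly sorted nonnegative list is its nonzero part, with 0 possibly in front
theorem pv_D_decomp (D : List Int) (hlt : D.Pairwise (· < ·)) (hnn : ∀ v ∈ D, 0 ≤ v) :
    (0 ∈ D → D = 0 :: D.filter (fun d => !(d == 0))) ∧
    (0 ∉ D → D = D.filter (fun d => !(d == 0))) := by
  cases D with
  | nil => simp
  | cons d t =>
    have ht : ∀ v ∈ t, d < v := (List.pairwise_cons.mp hlt).1
    by_cases hd : d = 0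
    · subst hd
      have hft : t.filter (fun d => !(d == 0)) = t := by
        apply List.filter_eq_self.mpr
        intro v hv
        have := ht v hv
        simp; omega
      constructor
      · intro _
        rw [List.filter_cons]
        simp [hft]
      · intro h0
        exact absurd (by simp) h0
    · have hdpos : 0 < d := by have := hnn d (by simp); omega
      have hfs : (d :: t).filter (fun d => !(d == 0)) = d :: t := by
        apply List.filter_eq_self.mpr
        intro v hv
        rcases List.mem_cons.mp hv with rfl | hvt
        · simp; omega
        · have := ht v hvt
          simp; omega
      constructor
      · intro h0
        rcases List.mem_cons.mp h0 with he | h0t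
        · exact absurd he.symm hd
        · have := ht 0 h0t
          omega
      · intro _
        exact hfs.symm

theorem pv_headD_getD (l : List Int) : l.headD 0 = l.getD 0 0 := by
  cases l <;> rfl

-- decompose any list into its leading block of copies of M and the rest
theorem pv_split_rep (l : List Int) (M : Int) :
    l = List.replicate ((l.takeWhile (fun v => v == M)).length) M ++
        l.dropWhile (fun v => v == M) := by
  conv_lhs => rw [← List.takeWhile_append_dropWhile (p := fun v => v == M) (l := l)]
  congr 1
  exact List.eq_replicate_of_mem (fun b hb => by
    have := List.mem_takeWhile_imp hb; simpa using this)

theorem pv_foldl_congr_mem {α β : Type} (l : List α) (f g : β → α → β)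
    (h : ∀ b x, x ∈ l → f b x = g b x) : ∀ a : β, l.foldl f a = l.foldl g a := by
  induction l with
  | nil => intro a; rfl
  | cons x t ih =>
    intro a
    rw [List.foldl_cons, List.foldl_cons, h a x (by simp),
      ih (fun b y hy => h b y (by simp [hy]))]

-- the carry pass equals: rank the digit string, add one, unrank
theorem pv_lists_eq (D nz : List Int) (m p r2 : Int) (fr : Int × List Int)
    (hlt : D.Pairwise (· < ·)) (hnn : ∀ v ∈ D, 0 ≤ v)
    (hnz : nz = D.filter (fun d => !(d == 0)))
    (hm : m = (D.length : Int)) (hp : p = (nz.length : Int))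
    (d0 : Int) (ds : List Int) (hd0 : d0 ∈ nz) (hds : ∀ v ∈ ds, v ∈ D)
    (hr2 : r2 = (ds.foldl (fun a v => a * m + ((D.idxOf v : Nat) : Int))
        ((nz.idxOf d0 : Nat) : Int)) + 1)
    (hfr : fr = if p * m ^ ds.length ≤ r2 then pvDecode D m (ds.length + 1) 0
                else pvDecode D m ds.length r2) :
    (pvCarry (nz.getLastD 0) (D.headD 0) (nz.headD 0) D ((d0 :: ds).reverse)).reverse
      = nz.getD fr.1.toNat 0 :: fr.2.reverse := by
  have hnzlt : nz.Pairwise (· < ·) := hnz ▸ hlt.filter _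
  have hd0D : d0 ∈ D := List.mem_of_mem_filter (hnz ▸ hd0)
  have hd0ne : d0 ≠ 0 := by
    have := (List.mem_filter.mp (hnz ▸ hd0)).2
    simpa using this
  have hd0pos : 0 < d0 := by have := hnn d0 hd0D; omega
  have hDne : D ≠ [] := List.ne_nil_of_mem hd0D
  have hnzne : nz ≠ [] := List.ne_nil_of_mem hd0
  have hm1 : (1 : Int) ≤ m := by
    have := List.length_pos_of_ne_nil hDne
    omega
  have hp1 : (1 : Int) ≤ p := by
    have := List.length_pos_of_ne_nil hnzne
    omega
  set M := nz.getLastD 0 with hMdef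
  set mz := nz.headD 0 with hmzdef
  set mB := D.headD 0 with hmBdef
  have hdec := pv_D_decomp D hlt hnn
  have hMD : D.getLastD 0 = M := by
    by_cases h0 : (0 : Int) ∈ D
    · rw [hdec.1 h0, ← hnz, List.getLastD_cons]
    · conv_lhs => rw [hdec.2 h0, ← hnz]
  have hMnz : M ∈ nz := pv_getLastD_mem nz hnzne
  have hMD' : M ∈ D := List.mem_of_mem_filter (hnz ▸ hMnz)
  have hmB0 : D.getD 0 0 = mB := (pv_headD_getD D).symm
  have hmz0 : nz.getD 0 0 = mz := (pv_headD_getD nz).symm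
  have hidxM : ((D.idxOf M : Nat) : Int) = m - 1 := by
    have h1 := pv_idxOf_last D hlt hDne
    rw [hMD] at h1
    rw [h1]
    have hl := List.length_pos_of_ne_nil hDne
    omega
  have hidxlt : ∀ v ∈ D, ((D.idxOf v : Nat) : Int) < m := by
    intro v hv
    have := List.idxOf_lt_length_of_mem hv
    omega
  set j0 : Int := ((nz.idxOf d0 : Nat) : Int) with hj0def
  have hj0lt : j0 < p := by
    have := List.idxOf_lt_length_of_mem hd0
    omega
  have hj00 : 0 ≤ j0 := Int.natCast_nonneg _
  have hnzj0 : nz.getD j0.toNat 0 = d0 := by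
    simp only [hj0def, Int.toNat_natCast]
    exact pv_getD_idxOf nz d0 hd0
  have hfind_eq : ∀ x : Int, 0 < x →
      D.find? (fun e => decide (x < e)) = nz.find? (fun e => decide (x < e)) := by
    intro x hx
    by_cases h0 : (0 : Int) ∈ D
    · conv_lhs => rw [hdec.1 h0, ← hnz]
      rw [List.find?_cons_of_neg (by simp; omega)]
    · conv_lhs => rw [hdec.2 h0, ← hnz]
  set js : List Int := ds.map (fun v => ((D.idxOf v : Nat) : Int)) with hjsdef
  have hjslen : js.length = ds.length := by simp [hjsdef]
  have hjsb : ∀ i ∈ js, 0 ≤ i ∧ i < m := by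
    intro i hi
    obtain ⟨v, hv, rfl⟩ := List.mem_map.mp hi
    exact ⟨Int.natCast_nonneg _, hidxlt v (hds v hv)⟩
  have hr2' : r2 = j0 * m ^ ds.length + pvVal m js + 1 := by
    have hf : ds.foldl (fun a v => a * m + ((D.idxOf v : Nat) : Int)) j0
        = js.foldl (fun a i => a * m + i) j0 := by
      rw [hjsdef, List.foldl_map]
    rw [hr2, hf, pv_enc_shift, hjslen]
  have hmpow : ∀ k : Nat, (0 : Int) < m ^ k := fun k => pow_pos (by omega) k
  -- split the reversed digits of ds into leading copies of M and the rest
  have hsplit := pv_split_rep ds.reverse M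
  set k := ((ds.reverse.takeWhile (fun v => v == M)).length) with hkdef
  set t := ds.reverse.dropWhile (fun v => v == M) with htdef
  cases htc : t with
  | nil =>
    rw [htc, List.append_nil] at hsplit
    have hdsrep : ds = List.replicate k M := by
      have := congrArg List.reverse hsplit
      rwa [List.reverse_reverse, List.reverse_replicate] at this
    have hklen : ds.length = k := by rw [hdsrep, List.length_replicate]
    have hjsrep : js = List.replicate k (m - 1) := by
      rw [hjsdef, hdsrep, List.map_replicate, hidxM]
    have hr2'' : r2 = (j0 + 1) * m ^ k := by
      rw [hr2', hjsrep, pv_val_repmax, hklen]; ring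
    have hrevall : (d0 :: ds).reverse = List.replicate k M ++ [d0] := by
      rw [List.reverse_cons, hdsrep, List.reverse_replicate]
    by_cases hd0M : d0 = M
    · -- every digit is maximal: overflow into the next length bucket
      have hj0p : j0 = p - 1 := by
        have h1 := pv_idxOf_last nz hnzlt hnzne
        rw [← hMdef, ← hd0M] at h1
        rw [hj0def, h1]
        have := List.length_pos_of_ne_nil hnzne
        omega
      have hcond : p * m ^ ds.length ≤ r2 := by
        rw [hr2'', hj0p, hklen]
        exact le_of_eq (by ring)
      rw [hfr, if_pos hcond]
      have hd := pv_decode_spec D m (by omega) (List.replicate (k + 1) (0 : Int))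
        (fun i hi => by rw [List.eq_of_mem_replicate hi]; omega) 0 le_rfl
      rw [List.length_replicate] at hd
      have hv0 : (0 : Int) * m ^ (k + 1) + pvVal m (List.replicate (k + 1) (0 : Int)) = 0 := by
        rw [pv_val_rep0]; ring
      rw [hv0] at hd
      have hmap : ((List.replicate (k + 1) (0 : Int)).map (fun i => D.getD i.toNat 0)).reverse
          = List.replicate (k + 1) mB := by
        simp only [List.map_replicate, List.reverse_replicate, Int.toNat_zero, hmB0]
      rw [hmap] at hd
      rw [hklen, hd]
      have hcarry : (pvCarry M mB mz D ((d0 :: ds).reverse)).reverse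
          = mz :: List.replicate (k + 1) mB := by
        rw [hrevall, hd0M, ← List.replicate_succ',
          show List.replicate (k + 1) M = List.replicate (k + 1) M ++ ([] : List Int) from
            (List.append_nil _).symm,
          pv_carry_replicate]
        show (List.replicate (k + 1) mB ++ [mz]).reverse = _
        rw [List.reverse_append, List.reverse_replicate]
        rfl
      rw [hcarry]
      simp only [Int.toNat_zero, List.reverse_replicate, hmz0]
    · -- only the trailing digits are maximal: bump the first digit's rank
      have hj0ne : j0 ≠ p - 1 := by
        intro he
        apply hd0M
        have h2 : ((p - 1 : Int)).toNat = nz.length - 1 := by omega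
        rw [← hnzj0, he, h2, ← pv_getLastD_getElem nz hnzne]
      have hcond : ¬ (p * m ^ ds.length ≤ r2) := by
        intro hc
        rw [hr2'', hklen] at hc
        have h1 : (j0 + 1) * m ^ k < p * m ^ k :=
          mul_lt_mul_of_pos_right (by omega) (hmpow k)
        omega
      rw [hfr, if_neg hcond]
      have hd := pv_decode_spec D m (by omega) (List.replicate k (0 : Int))
        (fun i hi => by rw [List.eq_of_mem_replicate hi]; omega) (j0 + 1) (by omega)
      rw [List.length_replicate] at hd
      have hv0 : (j0 + 1) * m ^ k + pvVal m (List.replicate k (0 : Int)) = r2 := by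
        rw [pv_val_rep0, hr2'']; ring
      rw [hv0] at hd
      have hmap : ((List.replicate k (0 : Int)).map (fun i => D.getD i.toNat 0)).reverse
          = List.replicate k mB := by
        simp only [List.map_replicate, List.reverse_replicate, Int.toNat_zero, hmB0]
      rw [hmap] at hd
      rw [hklen, hd]
      have hcarry : (pvCarry M mB mz D ((d0 :: ds).reverse)).reverse
          = ((D.find? (fun e => decide (d0 < e))).getD 0) :: List.replicate k mB := by
        rw [hrevall, pv_carry_replicate, pv_carry_hit _ _ _ _ _ _ hd0M,
          List.reverse_append, List.reverse_replicate]
        rfl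
      rw [hcarry]
      have hj1 : ((j0 + 1 : Int)).toNat = nz.idxOf d0 + 1 := by rw [hj0def]; omega
      rw [hj1, List.reverse_replicate]
      have hfind : (D.find? (fun e => decide (d0 < e))).getD 0
          = nz.getD (nz.idxOf d0 + 1) 0 := by
        rw [hfind_eq d0 hd0pos,
          pv_find_succ nz hnzlt d0 hd0 (show d0 ≠ nz.getLastD 0 from hd0M)]
      rw [hfind]
  | cons x post' =>
    have hxM : x ≠ M := by
      have := pv_dropWhile_head (fun v => v == M) ds.reverse x post' (htdef ▸ htc)
      simpa using this
    rw [htc] at hsplit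
    set pre := post'.reverse with hpredef
    have hdsdec : ds = pre ++ x :: List.replicate k M := by
      have := congrArg List.reverse hsplit
      rwa [List.reverse_reverse, List.reverse_append, List.reverse_cons,
        List.reverse_replicate, List.append_assoc, List.singleton_append] at this
    have hxds : x ∈ ds := by rw [hdsdec]; simp
    have hxD : x ∈ D := hds x hxds
    have hxlast : x ≠ D.getLastD 0 := by rw [hMD]; exact hxM
    have hpreD : ∀ v ∈ pre, v ∈ D := fun v hv => hds v (by rw [hdsdec]; simp [hv])
    set jx : Int := ((D.idxOf x : Nat) : Int) with hjxdef
    have hjxlt : jx + 1 < m := by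
      have := pv_idxOf_succ_lt D hlt x hxD hxlast
      omega
    have hjx0 : 0 ≤ jx := Int.natCast_nonneg _
    set idxF : Int → Int := fun v => ((D.idxOf v : Nat) : Int) with hidxFdef
    have hjs : js = pre.map idxF ++ jx :: List.replicate k (m - 1) := by
      have hiM : idxF M = m - 1 := hidxM
      rw [hjsdef, hdsdec, List.map_append, List.map_cons, List.map_replicate, hiM]
    set js' : List Int := pre.map idxF ++ (jx + 1) :: List.replicate k 0 with hjs'def
    have hlen' : js'.length = ds.length := by
      simp [hjs'def, hdsdec]
    have hvaljs' : pvVal m js' = pvVal m (pre.map idxF) * m ^ (k + 1) + (jx + 1) * m ^ k := by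
      rw [hjs'def, pv_val_append, pv_val_cons, pv_val_rep0, List.length_cons,
        List.length_replicate]
      ring
    have hr2'' : r2 = j0 * m ^ ds.length + pvVal m js' := by
      rw [hr2', hjs, pv_val_append, pv_val_cons, pv_val_repmax, hvaljs',
        List.length_cons, List.length_replicate]
      ring
    have hjs'b : ∀ i ∈ js', 0 ≤ i ∧ i < m := by
      intro i hi
      rw [hjs'def] at hi
      rcases List.mem_append.mp hi with h1 | h2
      · obtain ⟨v, hv, rfl⟩ := List.mem_map.mp h1
        exact ⟨Int.natCast_nonneg _, hidxlt v (hpreD v hv)⟩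
      · rcases List.mem_cons.mp h2 with rfl | h3
        · omega
        · rw [List.eq_of_mem_replicate h3]
          omega
    have hcond : ¬ (p * m ^ ds.length ≤ r2) := by
      intro hc
      obtain ⟨hv0', hv1'⟩ := pv_val_bounds m js' hjs'b
      rw [hlen'] at hv1'
      rw [hr2''] at hc
      have h1 : j0 * m ^ ds.length ≤ (p - 1) * m ^ ds.length :=
        mul_le_mul_of_nonneg_right (by omega) (le_of_lt (hmpow _))
      have h2 : (0 : Int) < m ^ ds.length := hmpow _
      nlinarith
    rw [hfr, if_neg hcond]
    have hd := pv_decode_spec D m (by omega) js' hjs'b j0 hj00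
    rw [hlen'] at hd
    rw [← hr2''] at hd
    rw [hd]
    simp only [List.reverse_reverse]
    have hmapjs' : js'.map (fun i => D.getD i.toNat 0)
        = pre ++ D.getD (D.idxOf x + 1) 0 :: List.replicate k mB := by
      rw [hjs'def, List.map_append, List.map_cons, List.map_replicate, List.map_map]
      congr 1
      · have h1 : ∀ v ∈ pre, ((fun i : Int => D.getD i.toNat 0) ∘ idxF) v = v := by
          intro v hv
          simp only [Function.comp, hidxFdef, Int.toNat_natCast]
          exact pv_getD_idxOf D v (hpreD v hv)
        rw [List.map_congr_left h1]
        simp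
      · have h2 : ((jx + 1 : Int)).toNat = D.idxOf x + 1 := by rw [hjxdef]; omega
        rw [h2]
        simp only [Int.toNat_zero, hmB0]
    rw [hmapjs', hnzj0]
    -- carry side
    have hrev : (d0 :: ds).reverse = List.replicate k M ++ x :: (post' ++ [d0]) := by
      rw [List.reverse_cons, hdsdec, List.reverse_append, List.reverse_cons,
        List.reverse_replicate, hpredef, List.reverse_reverse]
      simp
    rw [hrev, pv_carry_replicate, pv_carry_hit _ _ _ _ _ _ hxM]
    have hfind : (D.find? (fun e => decide (x < e))).getD 0 = D.getD (D.idxOf x + 1) 0 :=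
      pv_find_succ D hlt x hxD hxlast
    rw [hfind]
    simp [hpredef]

-- VERDICT helper: the whole equivalence
theorem pv_main (allowed : List Int) (current : String)
    (hpre : Pre_nextInteger allowed current) :
    nextInteger allowed current = nextInteger_alt allowed current := by
  obtain ⟨hallW, hne, hrest⟩ := hpre
  have hdictW : ∀ j : Int, 0 ≤ j → j ≤ 9 →
      pvGetBit (allowed.foldl pvSetTrue (List.replicate 10 false)) j =
        (decide (j ∈ allowed) || decide (j - 10 ∈ allowed)) := by
    intro j hj0 hj9
    rw [pv_getBit_foldl allowed hallW _ (by simp) j hj0 hj9]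
    have hz : pvGetBit (List.replicate 10 false) j = false := by
      interval_cases j <;> decide
    rw [hz, Bool.false_or]
  -- the sorted distinct digits, shared by the B-side reasoning
  set Dg := PySem.List.sorted (PySem.Set.ofList allowed) (fun x => x) false with hDgdef
  have hormem : ∀ y : Int, y ∈ Dg ↔ y ∈ allowed := by
    intro y
    rw [hDgdef, PySem.List.mem_sorted]
    simp [PySem.Set.mem_ofList]
  have holt : Dg.Pairwise (· < ·) := PySem.List.sorted_ofList_pairwise_lt allowed
  rcases hrest with ⟨hpos, hdo⟩ | hpref2 | ⟨hdigall, hhead0⟩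
  · -- no negative allowed values: full behavioural agreement
    have hall : ∀ x ∈ allowed, 0 ≤ x ∧ x ≤ 9 := fun x hx => ⟨hpos x hx, (hallW x hx).2⟩
    have hdict : ∀ j : Int, 0 ≤ j → j ≤ 9 →
        pvGetBit (allowed.foldl pvSetTrue (List.replicate 10 false)) j = decide (j ∈ allowed) := by
      intro j hj0 hj9
      rw [hdictW j hj0 hj9]
      have hz : decide (j - 10 ∈ allowed) = false := by
        simp only [decide_eq_false_iff_not]
        intro hmm
        have := hpos _ hmm
        omega
      rw [hz, Bool.or_false]
    rcases hdo with hdigb | hpref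
    · -- current is all digits
      have hdig : ∀ c ∈ current.toList, PySem.Chars.isdigit c = true := List.all_eq_true.mp hdigb
      have hvb : ∀ c ∈ current.toList, 0 ≤ pvDigitVal c ∧ pvDigitVal c ≤ 9 := by
        intro c hc
        obtain ⟨h1, h2⟩ := pv_isdigit_bounds c (hdig c hc)
        simp only [pvDigitVal]; omega
      have hbadA : pvBadLoop (allowed.foldl pvSetTrue (List.replicate 10 false)) current.toList
          = current.toList.any (fun c => !(decide (pvDigitVal c ∈ allowed))) := by
        rw [pv_badLoop_eq_any]
        apply pv_any_congr
        intro c hc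
        rw [hdict _ (hvb c hc).1 (hvb c hc).2]
      have hbadB : (current.toList.any
            (fun c => !(PySem.Set.contains (PySem.Set.ofList Dg) (pvDigitVal c))))
          = current.toList.any (fun c => !(decide (pvDigitVal c ∈ allowed))) := by
        apply pv_any_congr
        intro c hc
        rw [PySem.Set.contains_eq_decide]
        simp [PySem.Set.mem_ofList, hormem]
      by_cases hbad : current.toList.any (fun c => !(decide (pvDigitVal c ∈ allowed))) = true
      · have hA : nextInteger allowed current = "INVALID INPUT" := by
          simp only [nextInteger]
          rw [hbadA, hbad]
          simp
        have hB : nextInteger_alt allowed current = "INVALID INPUT" := by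
          simp only [nextInteger_alt, pvB_val_eq, ← hDgdef]
          rw [hbadB, hbad]
          simp
        rw [hA, hB]
      · rw [Bool.not_eq_true] at hbad
        have hmem : ∀ c ∈ current.toList, pvDigitVal c ∈ allowed := by
          intro c hc
          by_contra hno
          have : current.toList.any (fun c => !(decide (pvDigitVal c ∈ allowed))) = true :=
            List.any_eq_true.mpr ⟨c, hc, by simp [hno]⟩
          rw [hbad] at this; exact absurd this (by simp)
        obtain ⟨c0, rest, hcs⟩ := List.exists_cons_of_ne_nil hne
        by_cases h0 : c0 = '0'
        · -- leading zero: both return 'INVALID INPUT'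
          have hA : nextInteger allowed current = "INVALID INPUT" := by
            simp only [nextInteger]
            rw [hbadA, hbad]
            have : PySem.Str.pyGet? current 0 = some '0' := by
              simp [pysem, hcs, h0, PySem.List.pyGet?, PySem.List.pyIdx?]
            rw [this]
            simp
          have hB : nextInteger_alt allowed current = "INVALID INPUT" := by
            simp only [nextInteger_alt, pvB_val_eq, ← hDgdef]
            rw [hbadB, hbad]
            rw [hcs, h0]
            simp
          rw [hA, hB]
        · -- the genuine case
          have hc0cs : c0 ∈ current.toList := by rw [hcs]; simp
          have hc0d := hdig c0 hc0cs
          obtain ⟨hb1, hb2⟩ := pv_isdigit_bounds c0 hc0d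
          have hc0n : c0.toNat ≠ 48 := by
            intro hh
            apply h0
            rw [← Char.ofNat_toNat c0, hh]
          have hval0 : pvDigitVal c0 ∈ allowed := hmem c0 hc0cs
          have hvnz : pvDigitVal c0 ≠ 0 := by simp only [pvDigitVal]; omega
          have hdecz : (pvDecVal current.toList == 0) = false := by
            have hposv : 0 < pvDecVal current.toList := by
              rw [hcs]
              unfold pvDecVal
              rw [List.foldl_cons]
              apply pv_decVal_pos rest (10 * 0 + pvDigitVal c0) (by simp only [pvDigitVal]; omega)
              intro c hc; exact hdig c (by rw [hcs]; simp [hc])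
            simp [Int.ne_of_gt hposv]
          have hget0 : (PySem.Str.pyGet? current 0 == some '0') = false := by
            have hg : PySem.Str.pyGet? current 0 = some c0 := by
              simp [pysem, hcs, PySem.List.pyGet?, PySem.List.pyIdx?]
            rw [hg]
            simp [h0]
          have hheadB : (current.toList.headD ' ' == '0') = false := by
            rw [hcs]; simp [h0]
          simp only [nextInteger, nextInteger_alt, pvB_val_eq, ← hDgdef]
          rw [hbadA, hbadB, hbad]
          simp only [Bool.false_eq_true, if_false]
          rw [hdecz, hget0, hheadB]
          simp only [Bool.or_self, Bool.false_eq_true, if_false]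
          -- names for the shared quantities
          set NZ := Dg.filter (fun d => !(d == 0)) with hNZ
          have hnzmem : ∀ y : Int, y ∈ NZ ↔ y ∈ allowed ∧ y ≠ 0 := by
            intro y
            rw [hNZ, List.mem_filter]
            simp [hormem]
          have hnzlt : NZ.Pairwise (· < ·) := holt.filter _
          have hnzne : NZ ≠ [] := by
            intro hh
            have := (hnzmem (pvDigitVal c0)).mpr ⟨hval0, hvnz⟩
            rw [hh] at this
            simp at this
          have hmaxmem := (hnzmem _).mp (pv_getLastD_mem NZ hnzne)
          have hmaxmax : ∀ y ∈ allowed, y ≠ 0 → y ≤ NZ.getLastD 0 :=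
            fun y hy hy0 => pv_getLastD_max NZ hnzlt y ((hnzmem y).mpr ⟨hy, hy0⟩)
          have hminmem := (hnzmem _).mp (pv_headD_mem NZ hnzne)
          have hminmin : ∀ y ∈ allowed, y ≠ 0 → NZ.headD 0 ≤ y :=
            fun y hy hy0 => pv_headD_min NZ hnzlt y ((hnzmem y).mpr ⟨hy, hy0⟩)
          have hAmax := pv_maxBit_spec (allowed.foldl pvSetTrue (List.replicate 10 false)) allowed
            hall hdict (pvDigitVal c0) hval0 hvnz
          have hMA : pvFirstHit (allowed.foldl pvSetTrue (List.replicate 10 false)) 0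
              (PySem.List.pyRange 9 0 (-1)) = NZ.getLastD 0 :=
            le_antisymm (hmaxmax _ hAmax.1 hAmax.2.1) (hAmax.2.2 _ hmaxmem.1 hmaxmem.2)
          have hAmin := pv_minNZ_spec (allowed.foldl pvSetTrue (List.replicate 10 false)) allowed
            hall hdict (pvDigitVal c0) hval0 hvnz
          have hmzA : pvFirstHit (allowed.foldl pvSetTrue (List.replicate 10 false)) 9
              (PySem.List.pyRange 1 9 1) = NZ.headD 0 :=
            le_antisymm (hAmin.2.2 _ hminmem.1 hminmem.2) (hminmin _ hAmin.1 hAmin.2.1)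
          have hDnn : ∀ v ∈ Dg, 0 ≤ v := fun v hv => (hall v ((hormem v).mp hv)).1
          have hDdec := pv_D_decomp Dg holt hDnn
          -- A's minBit equals Dg's head
          have hmB : (if pvGetBit (allowed.foldl pvSetTrue (List.replicate 10 false)) 0
              then (0 : Int) else NZ.headD 0) = Dg.headD 0 := by
            rw [hdict 0 (le_refl 0) (by norm_num)]
            by_cases hz : (0 : Int) ∈ allowed
            · rw [if_pos (by simpa using hz)]
              rw [hDdec.1 ((hormem 0).mpr hz)]
              rfl
            · rw [if_neg (by simpa using hz)]
              conv_rhs => rw [hDdec.2 (fun hc => hz ((hormem 0).mp hc))]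
          rw [hMA, hmzA, hmB]
          have hmd : Dg.headD 0 = 0 ∨ Dg.headD 0 = NZ.headD 0 := by
            by_cases hz : (0 : Int) ∈ Dg
            · left; rw [hDdec.1 hz]; rfl
            · right; conv_lhs => rw [hDdec.2 hz]
          -- A's branch equals the carry pass (pv_core)
          have hA := pv_core allowed current current.toList
            (allowed.foldl pvSetTrue (List.replicate 10 false)) rfl hall hdict hdig hmem
            (NZ.getLastD 0) (NZ.headD 0) (Dg.headD 0) Dg hmaxmem.1 hmaxmax hminmem.1 hminmem.2
            hmd hormem holt
          rw [hA]
          -- the carry pass equals rank/add-one/unrank (pv_lists_eq)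
          set d0 := pvDigitVal c0 with hd0def
          set ds := rest.map pvDigitVal with hdsdef
          have hcsval : current.toList.map pvDigitVal = d0 :: ds := by
            rw [hcs, List.map_cons]
          have hrevval : (current.toList.reverse).map pvDigitVal = (d0 :: ds).reverse := by
            rw [List.map_reverse, hcsval]
          have hd0NZ : d0 ∈ NZ := (hnzmem d0).mpr ⟨hval0, hvnz⟩
          have hdsD : ∀ v ∈ ds, v ∈ Dg := by
            intro v hv
            rw [hdsdef] at hv
            obtain ⟨c, hc, rfl⟩ := List.mem_map.mp hv
            exact (hormem _).mpr (hmem c (by rw [hcs]; simp [hc]))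
          -- B's r0 and encode loop in terms of idxOf over values
          have hr0 : ((PySem.List.index? NZ (pvDigitVal (current.toList.headD ' '))).getD 0 : Nat)
              = ((NZ.idxOf d0 : Nat) : Int) := by
            rw [hcs]
            show (((PySem.List.index? NZ (pvDigitVal c0)).getD 0 : Nat) : Int) = _
            rw [pv_index?_mem NZ d0 hd0NZ]
            rfl
          have hdrop : current.toList.drop 1 = rest := by rw [hcs]; rfl
          have hfold : (current.toList.drop 1).foldl
              (fun a c => a * (Dg.length : Int) +
                (((PySem.List.index? Dg (pvDigitVal c)).getD 0 : Nat) : Int))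
              (((NZ.idxOf d0 : Nat) : Int))
              = ds.foldl (fun a v => a * (Dg.length : Int) + ((Dg.idxOf v : Nat) : Int))
                (((NZ.idxOf d0 : Nat) : Int)) := by
            rw [hdrop, hdsdef, List.foldl_map]
            apply pv_foldl_congr_mem
            intro b c hc
            have hcD : pvDigitVal c ∈ Dg := (hormem _).mpr (hmem c (by rw [hcs]; simp [hc]))
            rw [pv_index?_mem Dg _ hcD]
            rfl
          have hL1 : current.toList.length - 1 = ds.length := by
            rw [hcs, hdsdef]; simp
          have hlists := pv_lists_eq Dg NZ (Dg.length : Int) (NZ.length : Int)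
            ((ds.foldl (fun a v => a * (Dg.length : Int) + ((Dg.idxOf v : Nat) : Int))
              (((NZ.idxOf d0 : Nat) : Int))) + 1) _
            holt hDnn hNZ rfl rfl d0 ds hd0NZ hdsD rfl rfl
          rw [hrevval, hlists]
          -- finally match B's let-reduced expression
          rw [hr0, hfold, hL1]
          by_cases hcond : (NZ.length : Int) * (Dg.length : Int) ^ ds.length ≤
              (ds.foldl (fun a v => a * (Dg.length : Int) + ((Dg.idxOf v : Nat) : Int))
                (((NZ.idxOf d0 : Nat) : Int))) + 1
          · rw [if_pos hcond, if_pos hcond]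
            have hstep : current.toList.length + 1 - 1 = ds.length + 1 := by
              rw [hcs, hdsdef]; simp
            rw [hstep, List.map_cons]
          · rw [if_neg hcond, if_neg hcond, hL1, List.map_cons]
    · -- a disallowed digit precedes the first non-digit: both return 'INVALID INPUT'
      obtain ⟨c, hctw, hcbad⟩ := List.any_eq_true.mp hpref
      have hcd : PySem.Chars.isdigit c = true := List.mem_takeWhile_imp hctw
      have hcmem : c ∈ current.toList := List.takeWhile_subset _ hctw
      obtain ⟨hc1, hc2⟩ := pv_isdigit_bounds c hcd
      have hnotal : ((c.toNat : Int) - 48) ∉ allowed := by simpa using hcbad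
      have hA : nextInteger allowed current = "INVALID INPUT" := by
        simp only [nextInteger]
        have hb : pvBadLoop (allowed.foldl pvSetTrue (List.replicate 10 false)) current.toList
            = true := by
          rw [pv_badLoop_eq_any]
          refine List.any_eq_true.mpr ⟨c, hcmem, ?_⟩
          rw [show pvDigitVal c = (c.toNat : Int) - 48 from rfl,
            hdict _ (by omega) (by omega)]
          simp [hnotal]
        rw [hb]
        simp
      have hB : nextInteger_alt allowed current = "INVALID INPUT" := by
        simp only [nextInteger_alt, pvB_val_eq, ← hDgdef]
        have hb : current.toList.any
            (fun c => !(PySem.Set.contains (PySem.Set.ofList Dg) (pvDigitVal c))) = true := by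
          refine List.any_eq_true.mpr ⟨c, hcmem, ?_⟩
          rw [PySem.Set.contains_eq_decide]
          have : (pvDigitVal c) ∉ PySem.Set.ofList Dg := by
            rw [PySem.Set.mem_ofList, hormem]
            exact hnotal
          simp [this]
        rw [hb]
        simp
      rw [hA, hB]
  · -- a digit disallowed even after wraparound precedes the first non-digit
    obtain ⟨c, hctw, hcbad⟩ := List.any_eq_true.mp hpref2
    have hcd : PySem.Chars.isdigit c = true := List.mem_takeWhile_imp hctw
    have hcmem : c ∈ current.toList := List.takeWhile_subset _ hctw
    obtain ⟨hc1, hc2⟩ := pv_isdigit_bounds c hcd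
    obtain ⟨hnot1, hnot2⟩ : ((c.toNat : Int) - 48) ∉ allowed ∧ ((c.toNat : Int) - 48) - 10 ∉ allowed := by
      simpa using hcbad
    have hA : nextInteger allowed current = "INVALID INPUT" := by
      simp only [nextInteger]
      have hb : pvBadLoop (allowed.foldl pvSetTrue (List.replicate 10 false)) current.toList
          = true := by
        rw [pv_badLoop_eq_any]
        refine List.any_eq_true.mpr ⟨c, hcmem, ?_⟩
        rw [show pvDigitVal c = (c.toNat : Int) - 48 from rfl,
          hdictW _ (by omega) (by omega)]
        simp [hnot1, hnot2]
      rw [hb]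
      simp
    have hB : nextInteger_alt allowed current = "INVALID INPUT" := by
      simp only [nextInteger_alt, pvB_val_eq, ← hDgdef]
      have hb : current.toList.any
          (fun c => !(PySem.Set.contains (PySem.Set.ofList Dg) (pvDigitVal c))) = true := by
        refine List.any_eq_true.mpr ⟨c, hcmem, ?_⟩
        rw [PySem.Set.contains_eq_decide]
        have : (pvDigitVal c) ∉ PySem.Set.ofList Dg := by
          rw [PySem.Set.mem_ofList, hormem]
          exact hnot1
        simp [this]
      rw [hb]
      simp
    rw [hA, hB]
  · -- all digits with a leading zero: both say 'INVALID INPUT' whatever allowed enables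
    obtain ⟨c0, rest0, hcs0⟩ := List.exists_cons_of_ne_nil hne
    have hc00 : c0 = '0' := by rw [hcs0] at hhead0; simpa using hhead0
    have hA : nextInteger allowed current = "INVALID INPUT" := by
      simp only [nextInteger]
      by_cases hb : pvBadLoop (allowed.foldl pvSetTrue (List.replicate 10 false)) current.toList
          = true
      · rw [hb]; simp
      · rw [Bool.not_eq_true] at hb
        rw [hb]
        have hg : (PySem.Str.pyGet? current 0 == some '0') = true := by
          have : PySem.Str.pyGet? current 0 = some '0' := by
            simp [pysem, hcs0, hc00, PySem.List.pyGet?, PySem.List.pyIdx?]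
          rw [this]; rfl
        rw [hg]
        simp
    have hB : nextInteger_alt allowed current = "INVALID INPUT" := by
      simp only [nextInteger_alt, pvB_val_eq, ← hDgdef]
      by_cases hb : current.toList.any
          (fun c => !(PySem.Set.contains (PySem.Set.ofList Dg) (pvDigitVal c))) = true
      · rw [hb]; simp
      · rw [Bool.not_eq_true] at hb
        rw [hb]
        have hh : (current.toList.headD ' ' == '0') = true := by rw [hhead0]; rfl
        rw [hh]
        simp
    rw [hA, hB]

-- ===== VERDICT (by name: the statement is the Claim_ definition above) =====
theorem nextInteger_spec : Claim_equal_nextInteger := by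
  intro allowed current _ hpre
  unfold Spec_nextInteger
  exact pv_main allowed current hpre
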